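-- pv_equiv track=rewrite | github.com/PolyArch/loom | tests/scripts/check_bridge_tags.py | compute_expected_words
-- ===== SOURCE A (Python) =====
-- ADDR_BIT_WIDTH = 57
--
-- def compute_expected_words(
--         ld_count: int, st_count: int, num_region: int
-- ) -> int:
--     """Compute expected 32-bit word count for a bridge memory config.
--
--     Uses the same formula as RTL/genMemoryConfig:
--       tw = clog2(max(ldCount, stCount))
--       bits_per_region = ADDR_BIT_WIDTH + (tw+1) + tw + 1
--       total_bits = num_region * bits_per_region
--       words = ceil(total_bits / 32)
--     """
--     is_bridge = (ld_count > 1 or st_count > 1)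
--     tw = 0
--     if is_bridge:
--         tw = 1
--         while (1 << tw) < max(ld_count, st_count):
--             tw += 1
--     bits_per_region = ADDR_BIT_WIDTH + 1 + (tw + (tw + 1) if tw > 0 else 0)
--     total_bits = num_region * bits_per_region
--     return (total_bits + 31) // 32
-- ===== SOURCE B (Python) =====
-- ADDR_BIT_WIDTH = 57
--
-- def compute_expected_words(ld_count: int, st_count: int, num_region: int) -> int:
--     """Closed-form word count: bit_length replaces the incremental shift loop."""
--     if ld_count > 1 or st_count > 1:
--         tw = (max(ld_count, st_count) - 1).bit_length()
--         bits_per_region = ADDR_BIT_WIDTH + 2 * tw + 2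
--     else:
--         bits_per_region = ADDR_BIT_WIDTH + 1
--     return (num_region * bits_per_region + 31) // 32
-- ===== Notes on version B (the rewrite author's own statement) =====
-- stated objective: simpler
-- what changed: The incremental shift-until-big-enough while-loop computing tw is replaced by the closed-form (max(ld_count, st_count) - 1).bit_length(), and the tw>0 conditional arithmetic collapses into the two branches directly.
import Mathlib
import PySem

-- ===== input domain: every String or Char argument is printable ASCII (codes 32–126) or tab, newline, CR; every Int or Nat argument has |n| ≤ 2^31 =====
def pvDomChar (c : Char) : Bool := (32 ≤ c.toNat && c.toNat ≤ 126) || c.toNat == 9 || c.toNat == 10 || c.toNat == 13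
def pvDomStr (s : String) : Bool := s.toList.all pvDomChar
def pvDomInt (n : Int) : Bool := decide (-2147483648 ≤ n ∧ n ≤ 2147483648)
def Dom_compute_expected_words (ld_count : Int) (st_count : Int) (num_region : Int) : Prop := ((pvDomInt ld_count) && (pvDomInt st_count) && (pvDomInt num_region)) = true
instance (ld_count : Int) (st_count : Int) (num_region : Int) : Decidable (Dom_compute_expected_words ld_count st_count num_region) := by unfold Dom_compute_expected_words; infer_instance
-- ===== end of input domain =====

-- B replaces A's incremental shift-until-big-enough while-loop by the closed-form
-- bit_length of (max(ld_count, st_count) - 1); same return value, objective: simpler.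

-- ===== PORT A =====
-- A's while loop `while (1 << tw) < max(..): tw += 1`; fuel only makes it total
-- (fuel m.natAbs suffices: the loop takes at most size(m-1) - 1 < m.natAbs steps).
def twLoopA : Nat → Int → Nat → Nat
  | 0, _, tw => tw
  | f + 1, m, tw => if (2 ^ tw : Int) < m then twLoopA f m (tw + 1) else tw

def compute_expected_words (ld_count : Int) (st_count : Int) (num_region : Int) : Int :=
  let is_bridge := ld_count > 1 ∨ st_count > 1
  let tw : Nat := if is_bridge then twLoopA (max ld_count st_count).natAbs (max ld_count st_count) 1 else 0
  let bits_per_region : Int := 57 + 1 + (if tw > 0 then (tw : Int) + ((tw : Int) + 1) else 0)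
  let total_bits := num_region * bits_per_region
  PySem.Int.floordiv (total_bits + 31) 32

-- ===== PORT B =====
-- (m - 1).bit_length() for m - 1 ≥ 0 is Nat.size of its toNat.
def compute_expected_words_alt (ld_count : Int) (st_count : Int) (num_region : Int) : Int :=
  if ld_count > 1 ∨ st_count > 1 then
    let tw : Nat := Nat.size (max ld_count st_count - 1).toNat
    PySem.Int.floordiv (num_region * (57 + 2 * (tw : Int) + 2) + 31) 32
  else
    PySem.Int.floordiv (num_region * (57 + 1) + 31) 32

-- ===== PRECONDITION & SPEC =====
def Spec_compute_expected_words (ld_count : Int) (st_count : Int) (num_region : Int) (out : Int) : Prop := out = compute_expected_words_alt ld_count st_count num_region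
instance (ld_count : Int) (st_count : Int) (num_region : Int) (out : Int) : Decidable (Spec_compute_expected_words ld_count st_count num_region out) := by unfold Spec_compute_expected_words; infer_instance

-- ===== CLAIM (what is proved, stated in full; the proofs are below) =====
def Claim_equal_compute_expected_words : Prop := ∀ (ld_count : Int) (st_count : Int) (num_region : Int), Dom_compute_expected_words ld_count st_count num_region → Spec_compute_expected_words ld_count st_count num_region (compute_expected_words ld_count st_count num_region)

-- ===== LEMMAS AND PROOFS =====

/-- The fueled loop returns the first `t ≥ tw` with `m ≤ 2^t`, given enough fuel. -/
theorem twLoopA_eq (m : Int) (k : Nat)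
    (hlt : ∀ j, j < k → (2 ^ j : Int) < m) (hk : m ≤ 2 ^ k) :
    ∀ fuel tw, tw ≤ k → k ≤ tw + fuel → twLoopA fuel m tw = k := by
  intro fuel
  induction fuel with
  | zero =>
      intro tw h1 h2
      have : tw = k := by omega
      simp [twLoopA, this]
  | succ f ih =>
      intro tw h1 h2
      by_cases h : (2 ^ tw : Int) < m
      · have htk : tw < k := by
          rcases lt_or_eq_of_le h1 with h' | h'
          · exact h'
          · subst h'; exact absurd hk (not_le.mpr h)
        simp only [twLoopA, if_pos h]
        exact ih (tw + 1) (by omega) (by omega)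
      · have : tw = k := by
          rcases lt_or_eq_of_le h1 with h' | h'
          · exact absurd (hlt tw h') h
          · exact h'
        subst this
        simp [twLoopA, h]

/-- In the bridge case the loop value is the bit length of `m - 1`. -/
theorem twLoopA_bridge (m : Int) (hm : 2 ≤ m) :
    twLoopA m.natAbs m 1 = Nat.size (m - 1).toNat := by
  set n : Nat := (m - 1).toNat with hn
  have hmn : m = (n : Int) + 1 := by
    have : ((m - 1).toNat : Int) = m - 1 := Int.toNat_of_nonneg (by omega)
    omega
  have hn1 : 1 ≤ n := by omega
  set k : Nat := Nat.size n with hk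
  have hk1 : 1 ≤ k := Nat.size_pos.mpr hn1
  have hnk : n < 2 ^ k := Nat.lt_size_self n
  have hkn : k ≤ n := Nat.size_le.mpr (Nat.lt_two_pow_self)
  apply twLoopA_eq
  · intro j hj
    have h1 : 2 ^ (k - 1) ≤ n := by
      rcases Nat.lt_or_ge n (2 ^ (k - 1)) with h | h
      · have h0 : Nat.size n ≤ k - 1 := Nat.size_le.mpr h
        omega
      · exact h
    have h2 : 2 ^ j ≤ 2 ^ (k - 1) := Nat.pow_le_pow_right (by norm_num) (by omega)
    have h3 : (2 ^ j : Nat) ≤ n := le_trans h2 h1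
    have h4 : (2 : Int) ^ j ≤ (n : Int) := by exact_mod_cast h3
    omega
  · have h5 : (n : Int) < (2 : Int) ^ k := by exact_mod_cast hnk
    omega
  · exact hk1
  · have : k ≤ m.natAbs := by omega
    omega

-- ===== VERDICT (by name: the statement is the Claim_ definition above) =====
theorem compute_expected_words_spec : Claim_equal_compute_expected_words := by
  intro ld st nr _
  unfold Spec_compute_expected_words compute_expected_words compute_expected_words_alt
  by_cases hb : ld > 1 ∨ st > 1
  · have hm : 2 ≤ max ld st := by
      rcases hb with h | h
      · exact le_trans (by omega) (le_max_left ld st)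
      · exact le_trans (by omega) (le_max_right ld st)
    simp only [if_pos hb]
    rw [twLoopA_bridge _ hm]
    have hk1 : 1 ≤ Nat.size (max ld st - 1).toNat :=
      Nat.size_pos.mpr (by omega)
    have : Nat.size (max ld st - 1).toNat > 0 := hk1
    simp only [if_pos this]
    ring_nf
  · simp only [if_neg hb]
    norm_num
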